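-- pv_equiv track=rewrite | github.com/elyssov/eugenes-archives | tools/convert_docx_stories.py | ensure_h2_title
-- ===== SOURCE A (Python) =====
-- def ensure_h2_title(md_text, title):
--     """Ensure the story starts with a ## title for the parser.
--
--     Single-chapter stories need exactly one ## header at the top.
--     Convert any # headers to ##, or prepend ## title if none exists.
--     """
--     lines = md_text.split("\n")
--     result = []
--     has_h2 = False
--     found_first_heading = False
--
--     for line in lines:
--         stripped = line.strip()
--         # Convert # Heading to ## Heading (but not ## or ### etc.)
--         if stripped.startswith("# ") and not stripped.startswith("## "):
--             if not found_first_heading: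
--                 result.append(f"## {stripped[2:]}")
--                 has_h2 = True
--                 found_first_heading = True
--             else:
--                 # Subsequent # headings become ### (sub-sections within the single chapter)
--                 result.append(f"### {stripped[2:]}")
--         elif stripped.startswith("## ") and not stripped.startswith("### "):
--             has_h2 = True
--             found_first_heading = True
--             result.append(line)
--         else:
--             result.append(line)
--
--     md_text = "\n".join(result)
--
--     # If no heading was found at all, prepend one
--     if not has_h2:
--         md_text = f"## {title}\n\n{md_text}"
--
--     return md_text
-- ===== SOURCE B (Python) =====
-- def ensure_h2_title(md_text, title):
--     """Ensure the story starts with a ## title for the parser.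
--
--     Stateless re-implementation: precompute the index of the first heading
--     line, then render each line by position; prepend a title iff no heading.
--     """
--     lines = md_text.split("\n")
--     first = next((i for i, ln in enumerate(lines)
--                   if ln.strip().startswith(("# ", "## "))), None)
--
--     def render(i, ln):
--         s = ln.strip()
--         if s.startswith("# "):
--             return ("## " if i == first else "### ") + s[2:]
--         return ln
--
--     body = "\n".join(render(i, ln) for i, ln in enumerate(lines))
--     return body if first is not None else f"## {title}\n\n{body}"
-- ===== Notes on version B (the rewrite author's own statement) =====
-- stated objective: simpler
-- what changed: A threads has_h2/found_first_heading boolean accumulators through a stateful loop; B first computes the index of the first heading line, then renders every line statelessly by position and decides the title prepend from that index alone.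
import Mathlib
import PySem

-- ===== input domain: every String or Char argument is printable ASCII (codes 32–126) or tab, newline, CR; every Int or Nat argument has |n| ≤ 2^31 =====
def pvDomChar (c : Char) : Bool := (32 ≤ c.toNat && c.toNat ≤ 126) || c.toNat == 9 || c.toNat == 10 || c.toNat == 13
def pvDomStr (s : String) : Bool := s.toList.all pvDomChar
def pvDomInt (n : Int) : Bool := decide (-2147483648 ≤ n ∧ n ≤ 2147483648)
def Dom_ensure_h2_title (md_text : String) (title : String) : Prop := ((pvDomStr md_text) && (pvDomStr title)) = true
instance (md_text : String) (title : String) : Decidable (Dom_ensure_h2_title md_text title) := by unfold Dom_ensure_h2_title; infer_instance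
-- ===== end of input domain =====

-- B replaces A's accumulator-threaded loop (has_h2/found_first_heading flags) by a
-- stateless rendering driven by the precomputed index of the first heading line ('simpler').

-- ===== PORT A =====
-- the for loop, threading (result, has_h2, found_first_heading) exactly as the Python does
def pvALoop (lines : List String) (result : List String) (has_h2 : Bool) (found : Bool) :
    List String × Bool :=
  match lines with
  | [] => (result, has_h2)
  | line :: rest =>
    let stripped := PySem.Str.strip line
    if PySem.Str.startswith stripped "# " && !(PySem.Str.startswith stripped "## ") then
      if !found then
        pvALoop rest (result ++ ["## " ++ PySem.Str.slice stripped (some 2) none]) true true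
      else
        pvALoop rest (result ++ ["### " ++ PySem.Str.slice stripped (some 2) none]) has_h2 found
    else if PySem.Str.startswith stripped "## " && !(PySem.Str.startswith stripped "### ") then
      pvALoop rest (result ++ [line]) true true
    else
      pvALoop rest (result ++ [line]) has_h2 found

def ensure_h2_title (md_text : String) (title : String) : String :=
  -- split("\n") with a nonempty separator never raises: .getD [] is never taken
  let lines := (PySem.Str.split? md_text "\n").getD []
  let rs := pvALoop lines [] false false
  let md' := PySem.Str.join "\n" rs.1
  if !rs.2 then "## " ++ title ++ "\n\n" ++ md' else md'

-- ===== PORT B =====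
-- 'ln.strip().startswith(("# ", "## "))' of the generator in Source B
def pvIsHeading (line : String) : Bool :=
  PySem.Str.startswith (PySem.Str.strip line) "# " ||
  PySem.Str.startswith (PySem.Str.strip line) "## "

-- 'next((i for i, ln in enumerate(lines) if …), None)'
def pvFirstIdx : List String → Nat → Option Nat
  | [], _ => none
  | l :: ls, i => if pvIsHeading l then some i else pvFirstIdx ls (i + 1)

-- 'render(i, ln)' of Source B
def pvRender (first : Option Nat) (i : Nat) (line : String) : String :=
  let s := PySem.Str.strip line
  if PySem.Str.startswith s "# " then
    (if some i == first then "## " else "### ") ++ PySem.Str.slice s (some 2) none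
  else line

-- 'render(i, ln) for i, ln in enumerate(lines)'
def pvRenderAll (first : Option Nat) : List String → Nat → List String
  | [], _ => []
  | l :: ls, i => pvRender first i l :: pvRenderAll first ls (i + 1)

def ensure_h2_title_alt (md_text : String) (title : String) : String :=
  let lines := (PySem.Str.split? md_text "\n").getD []
  let first := pvFirstIdx lines 0
  let body := PySem.Str.join "\n" (pvRenderAll first lines 0)
  match first with
  | some _ => body
  | none => "## " ++ title ++ "\n\n" ++ body

-- ===== PRECONDITION & SPEC =====
def Spec_ensure_h2_title (md_text : String) (title : String) (out : String) : Prop := out = ensure_h2_title_alt md_text title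
instance (md_text : String) (title : String) (out : String) : Decidable (Spec_ensure_h2_title md_text title out) := by unfold Spec_ensure_h2_title; infer_instance

-- ===== CLAIM (what is proved, stated in full; the proofs are below) =====
def Claim_equal_ensure_h2_title : Prop := ∀ (md_text : String) (title : String), Dom_ensure_h2_title md_text title → Spec_ensure_h2_title md_text title (ensure_h2_title md_text title)

-- ===== LEMMAS AND PROOFS =====

-- "## " being a prefix excludes "# " (second characters differ), and "### " likewise excludes "## "
theorem pv_mutex21 (l : List Char) (h : PySem.Chars.startswith l ['#', '#', ' '] = true) :
    PySem.Chars.startswith l ['#', ' '] = false := by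
  rw [PySem.Chars.startswith_iff] at h
  obtain ⟨t, rfl⟩ := h
  by_contra hc
  rw [Bool.not_eq_false, PySem.Chars.startswith_iff] at hc
  simp [List.cons_prefix_cons] at hc

theorem pv_mutex32 (l : List Char) (h : PySem.Chars.startswith l ['#', '#', ' '] = true) :
    PySem.Chars.startswith l ['#', '#', '#', ' '] = false := by
  rw [PySem.Chars.startswith_iff] at h
  obtain ⟨t, rfl⟩ := h
  by_contra hc
  rw [Bool.not_eq_false, PySem.Chars.startswith_iff] at hc
  simp [List.cons_prefix_cons] at hc

-- once the first heading has been passed, pvRender never sees i = first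
theorem pvRenderAll_after (ls : List String) (j : Nat) :
    ∀ i, j < i → pvRenderAll (some j) ls i = ls.map (pvRender none 0) := by
  induction ls with
  | nil => intro i _; simp [pvRenderAll]
  | cons l ls ih =>
    intro i hi
    have hne : i ≠ j := by omega
    simp [pvRenderAll, pvRender, hne, ih (i + 1) (by omega)]

-- after both flags become true, A's loop is a plain map of the "###"-rendering
theorem pvALoop_true (ls : List String) :
    ∀ res, pvALoop ls res true true = (res ++ ls.map (pvRender none 0), true) := by
  induction ls with
  | nil => intro res; simp [pvALoop]
  | cons l ls ih =>
    intro res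
    by_cases c2 : PySem.Chars.startswith (PySem.Chars.strip l.toList) ['#', '#', ' '] = true
    · have c1 := pv_mutex21 _ c2
      have c3 := pv_mutex32 _ c2
      simp [pvALoop, pvRender, c1, c2, c3, ih]
    · rw [Bool.not_eq_true] at c2
      by_cases c1 : PySem.Chars.startswith (PySem.Chars.strip l.toList) ['#', ' '] = true
      · simp [pvALoop, pvRender, c1, c2, ih]
      · rw [Bool.not_eq_true] at c1
        simp [pvALoop, pvRender, c1, c2, ih]

-- the main invariant: A's loop from the untouched state equals B's index-based rendering
theorem pvALoop_eq (ls : List String) :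
    ∀ (i : Nat) (res : List String),
      pvALoop ls res false false =
        (res ++ pvRenderAll (pvFirstIdx ls i) ls i, (pvFirstIdx ls i).isSome) := by
  induction ls with
  | nil => intro i res; simp [pvALoop, pvFirstIdx, pvRenderAll]
  | cons l ls ih =>
    intro i res
    by_cases c2 : PySem.Chars.startswith (PySem.Chars.strip l.toList) ['#', '#', ' '] = true
    · -- first heading found here, of "## " shape: the original line is kept
      have c1 := pv_mutex21 _ c2
      have c3 := pv_mutex32 _ c2
      have hh : pvIsHeading l = true := by simp [pvIsHeading, c2]
      simp only [pvALoop, pvFirstIdx, pvRenderAll, hh, if_true]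
      rw [pvRenderAll_after ls i (i + 1) (by omega)]
      simp [pvRender, c1, c2, c3, pvALoop_true]
    · rw [Bool.not_eq_true] at c2
      by_cases c1 : PySem.Chars.startswith (PySem.Chars.strip l.toList) ['#', ' '] = true
      · -- first heading found here, of "# " shape: it becomes "## …"
        have hh : pvIsHeading l = true := by simp [pvIsHeading, c1]
        simp only [pvALoop, pvFirstIdx, pvRenderAll, hh, if_true]
        rw [if_pos (by simp [c1, c2]), if_pos (by simp)]
        rw [pvALoop_true, pvRenderAll_after ls i (i + 1) (by omega)]
        simp [pvRender, c1]
      · -- not a heading: both sides keep the line and move on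
        rw [Bool.not_eq_true] at c1
        have hh : pvIsHeading l = false := by simp [pvIsHeading, c1, c2]
        simp only [pvALoop, pvFirstIdx, pvRenderAll, hh]
        rw [if_neg (by simp [c1]), if_neg (by simp [c2]), ih (i + 1) (res ++ [l])]
        simp [pvRender, c1]

-- ===== VERDICT (by name: the statement is the Claim_ definition above) =====
theorem ensure_h2_title_spec : Claim_equal_ensure_h2_title := by
  intro md title _
  unfold Spec_ensure_h2_title
  simp only [ensure_h2_title, ensure_h2_title_alt]
  rw [pvALoop_eq ((PySem.Str.split? md "\n").getD []) 0 []]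
  cases h : pvFirstIdx ((PySem.Str.split? md "\n").getD []) 0 with
  | none => simp
  | some j => simp
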